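-- pv_equiv track=rewrite | github.com/aicoder2048/xiehouyu_game | game_ui.py | create_masked_html
-- ===== SOURCE A (Python) =====
-- from typing import Callable, Optional, List
--
-- def create_masked_html(text: str, mask_positions: List[int]) -> str:
--     """Create HTML with CSS masking boxes"""
--     if not mask_positions:
--         return text
--
--     # Create spans with masking for specified positions
--     html_parts = []
--     for i, char in enumerate(text):
--         if i in mask_positions:
--             # Create a masked character
--             html_parts.append(f'<span class="masked-char" data-char="{char}">&nbsp;</span>')
--         else:
--             html_parts.append(char)
--
--     return ''.join(html_parts)
-- ===== SOURCE B (Python) =====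
-- def create_masked_html(text, mask_positions):
--     """Create HTML with CSS masking boxes"""
--     chars = list(text)
--     for p in mask_positions:
--         if 0 <= p < len(chars):
--             chars[p] = f'<span class="masked-char" data-char="{text[p]}">&nbsp;</span>'
--     return ''.join(chars)
-- ===== Notes on version B (the rewrite author's own statement) =====
-- stated objective: faster
-- what changed: B builds a mutable char buffer and overwrites only the (in-range) masked positions, instead of scanning every character and testing list membership for each index.
import Mathlib
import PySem

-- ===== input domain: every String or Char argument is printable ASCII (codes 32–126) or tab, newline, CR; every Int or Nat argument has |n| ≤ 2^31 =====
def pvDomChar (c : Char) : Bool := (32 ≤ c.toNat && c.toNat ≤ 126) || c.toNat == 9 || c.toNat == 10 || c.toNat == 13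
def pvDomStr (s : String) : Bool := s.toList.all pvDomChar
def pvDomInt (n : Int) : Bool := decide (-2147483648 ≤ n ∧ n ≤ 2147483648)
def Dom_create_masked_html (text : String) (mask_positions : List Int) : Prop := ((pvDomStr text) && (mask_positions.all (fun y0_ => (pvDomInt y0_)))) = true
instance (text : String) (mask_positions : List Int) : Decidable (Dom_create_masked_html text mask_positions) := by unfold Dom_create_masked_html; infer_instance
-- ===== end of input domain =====

-- B edits a mutable char buffer at each (in-range) masked position instead of scanning
-- every character and testing membership: more idiomatic, and total just like A.

-- the f-string '<span class="masked-char" data-char="{c}">&nbsp;</span>' (shared literal)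
def pvSpan (c : Char) : String :=
  "<span class=\"masked-char\" data-char=\"" ++ String.singleton c ++ "\">&nbsp;</span>"

-- ===== PORT A =====
def create_masked_html (text : String) (mask_positions : List Int) : String :=
  if mask_positions.isEmpty then text
  else
    -- for i, char in enumerate(text): append span or char
    let html_parts : List String :=
      (PySem.List.enumerate text.toList 0).foldl
        (fun acc ic => acc ++ [if ic.1 ∈ mask_positions then pvSpan ic.2 else String.singleton ic.2]) []
    String.join html_parts

-- ===== PORT B =====
def create_masked_html_alt (text : String) (mask_positions : List Int) : String :=
  -- chars = list(text)
  let chars : List String := text.toList.map String.singleton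
  -- for p in mask_positions: if 0 <= p < len(chars): chars[p] = span(text[p])
  -- (text[p] is in range under the guard; getD ' ' is exact there)
  let chars :=
    mask_positions.foldl
      (fun acc p =>
        if 0 ≤ p ∧ p < (text.toList.length : Int) then
          acc.set p.toNat (pvSpan (text.toList.getD p.toNat ' '))
        else acc)
      chars
  String.join chars

-- ===== PRECONDITION & SPEC =====
def Spec_create_masked_html (text : String) (mask_positions : List Int) (out : String) : Prop := out = create_masked_html_alt text mask_positions
instance (text : String) (mask_positions : List Int) (out : String) : Decidable (Spec_create_masked_html text mask_positions out) := by unfold Spec_create_masked_html; infer_instance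

-- ===== CLAIM (what is proved, stated in full; the proofs are below) =====
def Claim_equal_create_masked_html : Prop := ∀ (text : String) (mask_positions : List Int), Dom_create_masked_html text mask_positions → Spec_create_masked_html text mask_positions (create_masked_html text mask_positions)

-- ===== LEMMAS AND PROOFS =====

theorem pv_foldl_append {α β : Type} (f : α → β) :
    ∀ (l : List α) (init : List β),
      l.foldl (fun acc x => acc ++ [f x]) init = init ++ l.map f := by
  intro l
  induction l with
  | nil => simp
  | cons x xs ih => intro init; simp [List.foldl_cons, ih]

-- B's fold: length is preserved
theorem pv_fold_length (t : List Char) :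
    ∀ (mps : List Int) (acc : List String),
      (mps.foldl
        (fun acc p =>
          if 0 ≤ p ∧ p < (t.length : Int) then
            acc.set p.toNat (pvSpan (t.getD p.toNat ' '))
          else acc) acc).length = acc.length := by
  intro mps
  induction mps with
  | nil => simp
  | cons p ps ih =>
    intro acc
    simp only [List.foldl_cons]
    rw [ih]
    split <;> simp

-- B's fold, elementwise: position i holds the span iff (i : Int) occurs among the positions
theorem pv_fold_get (t : List Char) :
    ∀ (mps : List Int) (acc : List String) (hlen : acc.length = t.length)
      (i : Nat) (h : i < t.length),
        (mps.foldl
          (fun acc p =>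
            if 0 ≤ p ∧ p < (t.length : Int) then
              acc.set p.toNat (pvSpan (t.getD p.toNat ' '))
            else acc) acc)[i]'(by rw [pv_fold_length]; omega)
          = if (i : Int) ∈ mps then pvSpan (t[i]'h) else acc[i]'(by omega) := by
  intro mps
  induction mps with
  | nil => intro acc hlen i h; simp
  | cons p ps ih =>
    intro acc hlen i h
    by_cases hg : 0 ≤ p ∧ p < (t.length : Int)
    · simp only [List.foldl_cons, if_pos hg]
      have hlen' : (acc.set p.toNat (pvSpan (t.getD p.toNat ' '))).length = t.length := by
        simp [hlen]
      rw [ih _ hlen' i h]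
      by_cases hm : (i : Int) ∈ ps
      · simp [hm, List.mem_cons, or_comm]
      · rw [if_neg hm]
        by_cases hip : (i : Int) = p
        · have hpn : p.toNat = i := by omega
          have : (i : Int) ∈ p :: ps := by simp [hip]
          rw [if_pos this, List.getElem_set, if_pos hpn, hpn, List.getD_eq_getElem _ _ h]
        · have : ¬ (i : Int) ∈ p :: ps := by simp [hip, hm]
          rw [if_neg this]
          rw [List.getElem_set_ne (by omega)]
    · simp only [List.foldl_cons, if_neg hg]
      rw [ih _ hlen i h]
      by_cases hm : (i : Int) ∈ ps
      · simp [hm, List.mem_cons, or_comm]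
      · rw [if_neg hm]
        have hip : (i : Int) ≠ p := by
          intro he
          exact hg ⟨by omega, by omega⟩
        have : ¬ (i : Int) ∈ p :: ps := by simp [hip, hm]
        rw [if_neg this]

theorem pv_join_singletons (l : List Char) :
    String.join (l.map String.singleton) = String.ofList l := by
  have h : (String.join (l.map String.singleton)).toList = l := by
    induction l with
    | nil => simp
    | cons c cs ih => simp [String.toList_join] at ih ⊢; exact ih
  have h2 := congrArg String.ofList h
  simp only [String.ofList_toList] at h2
  exact h2

-- ===== VERDICT (by name: the statement is the Claim_ definition above) =====
theorem create_masked_html_spec : Claim_equal_create_masked_html := by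
  intro text mps _
  unfold Spec_create_masked_html create_masked_html create_masked_html_alt
  set t := text.toList with ht
  by_cases he : mps.isEmpty
  · rw [if_pos he]
    have : mps = [] := List.isEmpty_iff.mp he
    subst this
    simp only [List.foldl_nil]
    rw [pv_join_singletons]
    simp [ht]
  · rw [if_neg he]
    simp only [pv_foldl_append, List.nil_append]
    have hlen : (t.map String.singleton).length = t.length := by simp
    congr 1
    apply List.ext_getElem
    · rw [pv_fold_length]
      simp [PySem.List.length_enumerate]
    · intro i h1 h2
      have hi : i < t.length := by
        simpa [PySem.List.length_enumerate] using h1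
      rw [pv_fold_get t mps (t.map String.singleton) hlen i hi]
      simp [PySem.List.getElem_enumerate]
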